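-- pv_equiv track=rewrite | github.com/joesurf/ECommerce-Analytics-Solutions | airflow_pipeline/dags/dataops.py | classify_cat
-- ===== SOURCE A (Python) =====
-- def classify_cat(x):
--     categories = {
--         'Furniture': ['office_furniture', 'furniture_decor', 'furniture_living_room', 'kitchen_dining_laundry_garden_furniture', 'bed_bath_table', 'home_comfort', 'home_comfort_2', 'home_construction', 'garden_tools', 'furniture_bedroom', 'furniture_mattress_and_upholstery'],
--         'Electronics': ['auto', 'computers_accessories', 'musical_instruments', 'consoles_games', 'watches_gifts', 'air_conditioning', 'telephony', 'electronics', 'fixed_telephony', 'tablets_printing_image', 'computers', 'small_appliances_home_oven_and_coffee', 'small_appliances', 'audio', 'signaling_and_security', 'security_and_services'],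
--         'Fashion': ['fashio_female_clothing', 'fashion_male_clothing', 'fashion_bags_accessories', 'fashion_shoes', 'fashion_sport', 'fashion_underwear_beach', 'fashion_childrens_clothes', 'baby', 'cool_stuff'],
--         'Home & Garden': ['housewares', 'home_confort', 'home_appliances', 'home_appliances_2', 'flowers', 'costruction_tools_garden', 'garden_tools', 'construction_tools_lights', 'costruction_tools_tools', 'luggage_accessories', 'la_cuisine', 'pet_shop', 'market_place'],
--         'Entertainment': ['sports_leisure', 'toys', 'cds_dvds_musicals', 'music', 'dvds_blu_ray', 'cine_photo', 'party_supplies', 'christmas_supplies', 'arts_and_craftmanship', 'art'],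
--         'Beauty & Health': ['health_beauty', 'perfumery', 'diapers_and_hygiene'],
--         'Food & Drinks': ['food_drink', 'drinks', 'food'],
--         'Books & Stationery': ['books_general_interest', 'books_technical', 'books_imported', 'stationery'],
--         'Industry & Construction': ['construction_tools_construction', 'construction_tools_safety', 'industry_commerce_and_business', 'agro_industry_and_commerce']
--     }
--     for category, products in categories.items():
--         if x in products:
--             return category
--     return 'Others'
-- ===== SOURCE B (Python) =====
-- # Hand-inverted lookup table: one flat product -> category dict and a single .get;
-- # the duplicate 'garden_tools' is written once, under 'Furniture' (A's first match).
-- _CAT_OF = {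
--     'office_furniture': 'Furniture',
--     'furniture_decor': 'Furniture',
--     'furniture_living_room': 'Furniture',
--     'kitchen_dining_laundry_garden_furniture': 'Furniture',
--     'bed_bath_table': 'Furniture',
--     'home_comfort': 'Furniture',
--     'home_comfort_2': 'Furniture',
--     'home_construction': 'Furniture',
--     'garden_tools': 'Furniture',
--     'furniture_bedroom': 'Furniture',
--     'furniture_mattress_and_upholstery': 'Furniture',
--     'auto': 'Electronics',
--     'computers_accessories': 'Electronics',
--     'musical_instruments': 'Electronics',
--     'consoles_games': 'Electronics',
--     'watches_gifts': 'Electronics',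
--     'air_conditioning': 'Electronics',
--     'telephony': 'Electronics',
--     'electronics': 'Electronics',
--     'fixed_telephony': 'Electronics',
--     'tablets_printing_image': 'Electronics',
--     'computers': 'Electronics',
--     'small_appliances_home_oven_and_coffee': 'Electronics',
--     'small_appliances': 'Electronics',
--     'audio': 'Electronics',
--     'signaling_and_security': 'Electronics',
--     'security_and_services': 'Electronics',
--     'fashio_female_clothing': 'Fashion',
--     'fashion_male_clothing': 'Fashion',
--     'fashion_bags_accessories': 'Fashion',
--     'fashion_shoes': 'Fashion',
--     'fashion_sport': 'Fashion',
--     'fashion_underwear_beach': 'Fashion',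
--     'fashion_childrens_clothes': 'Fashion',
--     'baby': 'Fashion',
--     'cool_stuff': 'Fashion',
--     'housewares': 'Home & Garden',
--     'home_confort': 'Home & Garden',
--     'home_appliances': 'Home & Garden',
--     'home_appliances_2': 'Home & Garden',
--     'flowers': 'Home & Garden',
--     'costruction_tools_garden': 'Home & Garden',
--     'construction_tools_lights': 'Home & Garden',
--     'costruction_tools_tools': 'Home & Garden',
--     'luggage_accessories': 'Home & Garden',
--     'la_cuisine': 'Home & Garden',
--     'pet_shop': 'Home & Garden',
--     'market_place': 'Home & Garden',
--     'sports_leisure': 'Entertainment',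
--     'toys': 'Entertainment',
--     'cds_dvds_musicals': 'Entertainment',
--     'music': 'Entertainment',
--     'dvds_blu_ray': 'Entertainment',
--     'cine_photo': 'Entertainment',
--     'party_supplies': 'Entertainment',
--     'christmas_supplies': 'Entertainment',
--     'arts_and_craftmanship': 'Entertainment',
--     'art': 'Entertainment',
--     'health_beauty': 'Beauty & Health',
--     'perfumery': 'Beauty & Health',
--     'diapers_and_hygiene': 'Beauty & Health',
--     'food_drink': 'Food & Drinks',
--     'drinks': 'Food & Drinks',
--     'food': 'Food & Drinks',
--     'books_general_interest': 'Books & Stationery',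
--     'books_technical': 'Books & Stationery',
--     'books_imported': 'Books & Stationery',
--     'stationery': 'Books & Stationery',
--     'construction_tools_construction': 'Industry & Construction',
--     'construction_tools_safety': 'Industry & Construction',
--     'industry_commerce_and_business': 'Industry & Construction',
--     'agro_industry_and_commerce': 'Industry & Construction',
-- }
--
-- def classify_cat(x):
--     return _CAT_OF.get(x, 'Others')
-- ===== Notes on version B (the rewrite author's own statement) =====
-- stated objective: idiomatic
-- what changed: Replaces A's per-call scan over nested per-category product lists with a hand-inverted flat product->category dictionary (the duplicate 'garden_tools' written once under 'Furniture', preserving A's first-match result) and a single dict .get with default 'Others'.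
import Mathlib
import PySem

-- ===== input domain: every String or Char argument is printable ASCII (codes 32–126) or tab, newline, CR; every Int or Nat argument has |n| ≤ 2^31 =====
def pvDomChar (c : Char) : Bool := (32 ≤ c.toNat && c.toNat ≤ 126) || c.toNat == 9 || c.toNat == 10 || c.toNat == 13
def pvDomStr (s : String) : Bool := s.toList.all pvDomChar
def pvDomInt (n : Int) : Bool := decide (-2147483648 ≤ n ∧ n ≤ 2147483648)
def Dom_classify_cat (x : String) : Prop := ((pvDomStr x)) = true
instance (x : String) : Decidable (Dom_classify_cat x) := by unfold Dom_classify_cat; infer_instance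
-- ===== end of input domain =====

-- B replaces A's per-call scan over nested category lists by a hand-inverted flat
-- product -> category dictionary and a single lookup with default "Others" (idiomatic).

-- ===== PORT A =====
def pvCatsA : List (String × List String) := [
  ("Furniture", ["office_furniture", "furniture_decor", "furniture_living_room", "kitchen_dining_laundry_garden_furniture", "bed_bath_table", "home_comfort", "home_comfort_2", "home_construction", "garden_tools", "furniture_bedroom", "furniture_mattress_and_upholstery"]),
  ("Electronics", ["auto", "computers_accessories", "musical_instruments", "consoles_games", "watches_gifts", "air_conditioning", "telephony", "electronics", "fixed_telephony", "tablets_printing_image", "computers", "small_appliances_home_oven_and_coffee", "small_appliances", "audio", "signaling_and_security", "security_and_services"]),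
  ("Fashion", ["fashio_female_clothing", "fashion_male_clothing", "fashion_bags_accessories", "fashion_shoes", "fashion_sport", "fashion_underwear_beach", "fashion_childrens_clothes", "baby", "cool_stuff"]),
  ("Home & Garden", ["housewares", "home_confort", "home_appliances", "home_appliances_2", "flowers", "costruction_tools_garden", "garden_tools", "construction_tools_lights", "costruction_tools_tools", "luggage_accessories", "la_cuisine", "pet_shop", "market_place"]),
  ("Entertainment", ["sports_leisure", "toys", "cds_dvds_musicals", "music", "dvds_blu_ray", "cine_photo", "party_supplies", "christmas_supplies", "arts_and_craftmanship", "art"]),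
  ("Beauty & Health", ["health_beauty", "perfumery", "diapers_and_hygiene"]),
  ("Food & Drinks", ["food_drink", "drinks", "food"]),
  ("Books & Stationery", ["books_general_interest", "books_technical", "books_imported", "stationery"]),
  ("Industry & Construction", ["construction_tools_construction", "construction_tools_safety", "industry_commerce_and_business", "agro_industry_and_commerce"])]

-- the 'for category, products in categories.items(): if x in products: return category' loop
def pvClassifyLoop (x : String) : List (String × List String) → String
  | [] => "Others"
  | (c, ps) :: rest => if ps.contains x then c else pvClassifyLoop x rest

def classify_cat (x : String) : String := pvClassifyLoop x pvCatsA

-- ===== PORT B =====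
-- Source B's literal inverse dict _CAT_OF (no duplicate keys: 'garden_tools' appears once)
def pvCatOf : PySem.Dict String String := PySem.Dict.mk [
  ("office_furniture", "Furniture"),
  ("furniture_decor", "Furniture"),
  ("furniture_living_room", "Furniture"),
  ("kitchen_dining_laundry_garden_furniture", "Furniture"),
  ("bed_bath_table", "Furniture"),
  ("home_comfort", "Furniture"),
  ("home_comfort_2", "Furniture"),
  ("home_construction", "Furniture"),
  ("garden_tools", "Furniture"),
  ("furniture_bedroom", "Furniture"),
  ("furniture_mattress_and_upholstery", "Furniture"),
  ("auto", "Electronics"),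
  ("computers_accessories", "Electronics"),
  ("musical_instruments", "Electronics"),
  ("consoles_games", "Electronics"),
  ("watches_gifts", "Electronics"),
  ("air_conditioning", "Electronics"),
  ("telephony", "Electronics"),
  ("electronics", "Electronics"),
  ("fixed_telephony", "Electronics"),
  ("tablets_printing_image", "Electronics"),
  ("computers", "Electronics"),
  ("small_appliances_home_oven_and_coffee", "Electronics"),
  ("small_appliances", "Electronics"),
  ("audio", "Electronics"),
  ("signaling_and_security", "Electronics"),
  ("security_and_services", "Electronics"),
  ("fashio_female_clothing", "Fashion"),
  ("fashion_male_clothing", "Fashion"),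
  ("fashion_bags_accessories", "Fashion"),
  ("fashion_shoes", "Fashion"),
  ("fashion_sport", "Fashion"),
  ("fashion_underwear_beach", "Fashion"),
  ("fashion_childrens_clothes", "Fashion"),
  ("baby", "Fashion"),
  ("cool_stuff", "Fashion"),
  ("housewares", "Home & Garden"),
  ("home_confort", "Home & Garden"),
  ("home_appliances", "Home & Garden"),
  ("home_appliances_2", "Home & Garden"),
  ("flowers", "Home & Garden"),
  ("costruction_tools_garden", "Home & Garden"),
  ("construction_tools_lights", "Home & Garden"),
  ("costruction_tools_tools", "Home & Garden"),
  ("luggage_accessories", "Home & Garden"),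
  ("la_cuisine", "Home & Garden"),
  ("pet_shop", "Home & Garden"),
  ("market_place", "Home & Garden"),
  ("sports_leisure", "Entertainment"),
  ("toys", "Entertainment"),
  ("cds_dvds_musicals", "Entertainment"),
  ("music", "Entertainment"),
  ("dvds_blu_ray", "Entertainment"),
  ("cine_photo", "Entertainment"),
  ("party_supplies", "Entertainment"),
  ("christmas_supplies", "Entertainment"),
  ("arts_and_craftmanship", "Entertainment"),
  ("art", "Entertainment"),
  ("health_beauty", "Beauty & Health"),
  ("perfumery", "Beauty & Health"),
  ("diapers_and_hygiene", "Beauty & Health"),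
  ("food_drink", "Food & Drinks"),
  ("drinks", "Food & Drinks"),
  ("food", "Food & Drinks"),
  ("books_general_interest", "Books & Stationery"),
  ("books_technical", "Books & Stationery"),
  ("books_imported", "Books & Stationery"),
  ("stationery", "Books & Stationery"),
  ("construction_tools_construction", "Industry & Construction"),
  ("construction_tools_safety", "Industry & Construction"),
  ("industry_commerce_and_business", "Industry & Construction"),
  ("agro_industry_and_commerce", "Industry & Construction")]

def classify_cat_alt (x : String) : String := pvCatOf.getD x "Others"

-- ===== PRECONDITION & SPEC =====
def Spec_classify_cat (x : String) (out : String) : Prop := out = classify_cat_alt x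
instance (x : String) (out : String) : Decidable (Spec_classify_cat x out) := by unfold Spec_classify_cat; infer_instance

-- ===== CLAIM (what is proved, stated in full; the proofs are below) =====
def Claim_equal_classify_cat : Prop := ∀ (x : String), Dom_classify_cat x → Spec_classify_cat x (classify_cat x)

-- ===== LEMMAS AND PROOFS =====

-- flatten A's table into an association list (first match = A's first match)
def pvFlatA : List (String × String) :=
  pvCatsA.flatMap (fun cp => cp.2.map (fun p => (p, cp.1)))

theorem pvGet?_mk_append (l1 l2 : List (String × String)) (x : String) :
    (PySem.Dict.mk (l1 ++ l2)).get? x =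
      ((PySem.Dict.mk l1).get? x).or ((PySem.Dict.mk l2).get? x) := by
  induction l1 with
  | nil =>
    rw [List.nil_append]
    have h : (PySem.Dict.mk ([] : List (String × String))).get? x = none :=
      PySem.Dict.get?_empty x
    rw [h, Option.none_or]
  | cons hd tl ih =>
    rw [List.cons_append, PySem.Dict.get?_mk_cons, PySem.Dict.get?_mk_cons]
    by_cases h : (hd.1 == x) = true
    · rw [if_pos h, if_pos h, Option.some_or]
    · rw [if_neg h, if_neg h]; exact ih

theorem pvGet?_mk_map_const (ps : List String) (c x : String) :
    (PySem.Dict.mk (ps.map (fun p => (p, c)))).get? x =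
      if ps.contains x then some c else none := by
  induction ps with
  | nil =>
    rw [List.map_nil]
    have h : (PySem.Dict.mk ([] : List (String × String))).get? x = none :=
      PySem.Dict.get?_empty x
    rw [h, List.contains_nil, if_neg (by simp)]
  | cons p rest ih =>
    rw [List.map_cons, PySem.Dict.get?_mk_cons, ih]
    by_cases h : x = p
    · subst h; simp
    · have hb : (p == x) = false := by simp [Ne.symm h]
      simp [hb, h]

theorem pvLoop_eq_flat_lookup (x : String) (l : List (String × List String)) :
    pvClassifyLoop x l =
      ((PySem.Dict.mk (l.flatMap (fun cp => cp.2.map (fun p => (p, cp.1))))).get? x).getD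
        "Others" := by
  induction l with
  | nil =>
    have h : (PySem.Dict.mk ([] : List (String × String))).get? x = none :=
      PySem.Dict.get?_empty x
    simp [pvClassifyLoop, h]
  | cons hd tl ih =>
    obtain ⟨c, ps⟩ := hd
    rw [List.flatMap_cons, pvGet?_mk_append, pvGet?_mk_map_const]
    simp only [pvClassifyLoop]
    split_ifs with h
    · simp
    · simp [ih]

-- first-match lookups in the flattened A-table and in B's dict agree on every string:
-- on the (finite) keys of either list by computation, elsewhere both are none.
theorem pvLookup_agree (x : String) :
    (PySem.Dict.mk pvFlatA).get? x = pvCatOf.get? x := by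
  by_cases h : x ∈ (PySem.Dict.mk pvFlatA).keys
  · have hk : ∀ k ∈ (PySem.Dict.mk pvFlatA).keys,
        (PySem.Dict.mk pvFlatA).get? k = pvCatOf.get? k := by decide
    exact hk x h
  · have hsub : ∀ k ∈ pvCatOf.keys, k ∈ (PySem.Dict.mk pvFlatA).keys := by decide
    have h2 : x ∉ pvCatOf.keys := fun hx => h (hsub x hx)
    rw [(PySem.Dict.get?_eq_none_iff_not_mem_keys _ _).mpr h,
      (PySem.Dict.get?_eq_none_iff_not_mem_keys _ _).mpr h2]

-- ===== VERDICT (by name: the statement is the Claim_ definition above) =====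
theorem classify_cat_spec : Claim_equal_classify_cat := by
  intro x _
  show classify_cat x = classify_cat_alt x
  unfold classify_cat classify_cat_alt
  rw [pvLoop_eq_flat_lookup, PySem.Dict.getD_eq_get?_getD]
  rw [show pvCatsA.flatMap (fun cp => cp.2.map (fun p => (p, cp.1))) = pvFlatA from rfl]
  rw [pvLookup_agree]
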